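-- pv_equiv track=rewrite | github.com/Ibra-Hud/Various-Python- | Factorial.py | factorial_str
-- ===== SOURCE A (Python) =====
-- def factorial_str(fact_counter, fact_value):
--     output_string = ''
--
--     if fact_counter == 0:      # Base case: 0! = 1
--         output_string += '1'
--     elif fact_counter == 1:    # Base case: print 1 and result
--         output_string += str(fact_counter) +  ' = ' + str(fact_value)
--     else:                       # Recursive case
--         output_string += str(fact_counter) + ' * '
--         next_counter = fact_counter - 1
--         next_value = next_counter * fact_value
--         output_string += str(factorial_str(next_counter, next_value))
--
--     return output_string
-- ===== SOURCE B (Python) =====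
-- def factorial_str(fact_counter, fact_value):
--     if fact_counter == 0:
--         return '1'
--     parts = []
--     counter, value = fact_counter, fact_value
--     while counter != 1:
--         parts.append(str(counter) + ' * ')
--         counter -= 1
--         value = counter * value
--     parts.append(str(counter) + ' = ' + str(value))
--     return ''.join(parts)
-- ===== Notes on version B (the rewrite author's own statement) =====
-- stated objective: simpler
-- what changed: Replaced the recursive call chain (which builds the string through stack unwinding) with a single iterative while-loop that threads counter/value, collects parts in a list and joins them once.
import Mathlib
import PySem

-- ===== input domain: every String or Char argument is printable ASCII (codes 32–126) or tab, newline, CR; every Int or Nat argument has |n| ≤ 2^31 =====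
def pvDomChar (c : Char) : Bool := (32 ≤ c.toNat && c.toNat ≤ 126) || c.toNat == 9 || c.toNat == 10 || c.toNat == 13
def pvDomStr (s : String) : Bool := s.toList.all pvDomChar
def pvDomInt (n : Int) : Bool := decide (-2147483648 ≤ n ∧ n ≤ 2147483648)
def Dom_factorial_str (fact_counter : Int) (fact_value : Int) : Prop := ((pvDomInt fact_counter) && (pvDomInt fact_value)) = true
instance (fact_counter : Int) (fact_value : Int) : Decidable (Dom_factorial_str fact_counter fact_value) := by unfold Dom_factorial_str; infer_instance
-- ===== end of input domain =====

-- B replaces A's recursive call chain with one iterative loop collecting parts; objective: simpler.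

-- ===== PORT A =====
-- literal transliteration of A's recursion; the 'fact_counter < 0' branch is a totality
-- guard only (Python recurses forever there; those inputs are outside Pre_)
def factorial_str (fact_counter : Int) (fact_value : Int) : String :=
  if fact_counter = 0 then "1"
  else if fact_counter = 1 then PySem.Int.toStr fact_counter ++ " = " ++ PySem.Int.toStr fact_value
  else if fact_counter < 0 then ""   -- totality guard, outside Pre_
  else
    PySem.Int.toStr fact_counter ++ " * " ++
      factorial_str (fact_counter - 1) ((fact_counter - 1) * fact_value)
termination_by fact_counter.toNat
decreasing_by omega

-- ===== PORT B =====
-- the while-loop of Source B; 'counter ≤ 1' instead of 'counter ≠ 1' only to be total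
-- (Python's loop never terminates for counter < 1 except the pre-checked 0; outside Pre_)
def pvLoopB (counter : Int) (value : Int) (parts : List String) : List String :=
  if counter ≤ 1 then parts ++ [PySem.Int.toStr counter ++ " = " ++ PySem.Int.toStr value]
  else pvLoopB (counter - 1) ((counter - 1) * value) (parts ++ [PySem.Int.toStr counter ++ " * "])
termination_by counter.toNat
decreasing_by omega

def factorial_str_alt (fact_counter : Int) (fact_value : Int) : String :=
  if fact_counter = 0 then "1"
  else String.join (pvLoopB fact_counter fact_value [])

-- ===== PRECONDITION & SPEC =====
-- Pre_ excludes negative fact_counter: there Python A never reaches a base case and raises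
-- RecursionError (and B's loop never terminates), so neither returns a value.
def Pre_factorial_str (fact_counter : Int) (fact_value : Int) : Prop := 0 ≤ fact_counter
instance (fact_counter : Int) (fact_value : Int) : Decidable (Pre_factorial_str fact_counter fact_value) := by unfold Pre_factorial_str; infer_instance
def pvWitness_factorial_str : Int × Int := (5, 5)

def Spec_factorial_str (fact_counter : Int) (fact_value : Int) (out : String) : Prop := out = factorial_str_alt fact_counter fact_value
instance (fact_counter : Int) (fact_value : Int) (out : String) : Decidable (Spec_factorial_str fact_counter fact_value out) := by unfold Spec_factorial_str; infer_instance

-- ===== CLAIM (what is proved, stated in full; the proofs are below) =====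
def Claim_equal_factorial_str : Prop := ∀ (fact_counter : Int) (fact_value : Int), Dom_factorial_str fact_counter fact_value → Pre_factorial_str fact_counter fact_value → Spec_factorial_str fact_counter fact_value (factorial_str fact_counter fact_value)

-- ===== LEMMAS AND PROOFS =====

theorem pv_foldl_append (l : List String) (a : String) :
    List.foldl (fun r s => r ++ s) a l = a ++ List.foldl (fun r s => r ++ s) "" l := by
  induction l generalizing a with
  | nil => simp
  | cons x xs ih =>
    simp only [List.foldl]
    rw [ih (a ++ x), ih ("" ++ x)]
    simp [String.append_assoc]

theorem pv_join_cons (s : String) (l : List String) :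
    String.join (s :: l) = s ++ String.join l := by
  simp only [String.join, List.foldl]
  rw [pv_foldl_append]
  simp

theorem pvLoopB_acc_aux (n : Nat) : ∀ (c v : Int), c.toNat = n → ∀ parts, pvLoopB c v parts = parts ++ pvLoopB c v [] := by
  induction n with
  | zero =>
    intro c v hn parts
    rw [pvLoopB]; conv_rhs => rw [pvLoopB]
    have h : c ≤ 1 := by omega
    simp [h]
  | succ n ih =>
    intro c v hn parts
    rw [pvLoopB]; conv_rhs => rw [pvLoopB]
    by_cases h : c ≤ 1
    · simp [h]
    · simp only [h, if_neg, not_false_iff]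
      rw [ih (c - 1) ((c - 1) * v) (by omega) (parts ++ [PySem.Int.toStr c ++ " * "]),
          ih (c - 1) ((c - 1) * v) (by omega) ([] ++ [PySem.Int.toStr c ++ " * "])]
      simp

theorem pvLoopB_acc (c v : Int) (parts : List String) :
    pvLoopB c v parts = parts ++ pvLoopB c v [] :=
  pvLoopB_acc_aux c.toNat c v rfl parts

theorem factorial_str_pos (n : Nat) : ∀ c v : Int, c.toNat = n → 1 ≤ c → factorial_str c v = String.join (pvLoopB c v []) := by
  induction n with
  | zero => intro c v hn h1; omega
  | succ n ih =>
    intro c v hn h1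
    by_cases h : c = 1
    · subst h
      rw [factorial_str, pvLoopB]
      simp [String.join]
    · rw [factorial_str, pvLoopB]
      have h0 : ¬ c = 0 := by omega
      have hneg : ¬ c < 0 := by omega
      have hc : ¬ c ≤ 1 := by omega
      simp only [h0, h, hneg, hc, ite_false]
      rw [pvLoopB_acc, ih (c - 1) ((c - 1) * v) (by omega) (by omega)]
      simp only [List.nil_append, List.singleton_append, pv_join_cons]

-- ===== VERDICT (by name: the statement is the Claim_ definition above) =====
theorem factorial_str_spec : Claim_equal_factorial_str := by
  intro c v _ hpre
  unfold Spec_factorial_str factorial_str_alt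
  by_cases h0 : c = 0
  · subst h0; rw [factorial_str]; simp
  · rw [if_neg h0,
        factorial_str_pos c.toNat c v rfl (by unfold Pre_factorial_str at hpre; omega)]
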